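-- pv_equiv track=rewrite | github.com/haydenmlh/csc108_lectures_practicals | Practicals/week5/week5_activity1.py | every_third
-- ===== SOURCE A (Python) =====
-- from typing import List
--
-- def every_third(L: List[str]) -> List[str]:
--     count = 2
--     acc = []
--     for i in range(len(L)):
--         count += 1
--         if count == 3:
--             acc.append(L[i])
--             count = 0
--     return acc
-- ===== SOURCE B (Python) =====
-- from typing import List
--
-- def every_third(L: List[str]) -> List[str]:
--     acc = []
--     for i in range(0, len(L), 3):
--         acc.append(L[i])
--     return acc
-- ===== Notes on version B (the rewrite author's own statement) =====
-- stated objective: simpler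
-- what changed: Replaces the counter-maintaining loop over all indices (with a reset-on-3 conditional) by a direct loop over the stepped index set range(0, len(L), 3), removing the counter state and the branch.
import Mathlib
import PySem

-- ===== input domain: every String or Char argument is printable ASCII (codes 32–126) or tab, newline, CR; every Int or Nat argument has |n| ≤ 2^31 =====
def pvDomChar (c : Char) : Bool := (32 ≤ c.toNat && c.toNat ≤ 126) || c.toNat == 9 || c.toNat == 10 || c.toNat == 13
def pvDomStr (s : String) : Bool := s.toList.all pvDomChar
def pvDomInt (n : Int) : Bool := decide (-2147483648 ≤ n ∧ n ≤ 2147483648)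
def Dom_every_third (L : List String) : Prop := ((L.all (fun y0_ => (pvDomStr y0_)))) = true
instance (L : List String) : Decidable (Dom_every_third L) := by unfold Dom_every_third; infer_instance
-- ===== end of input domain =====

-- B replaces A's counter-with-reset loop over every index by a direct loop over the
-- stepped index set range(0, len(L), 3): no counter state, no conditional (objective: simpler).

-- ===== PORT A =====
-- the loop 'for i in range(len(L))' with state (count, acc); L[i] is always in range, so pyGetD is exact here
def every_third (L : List String) : List String :=
  ((PySem.List.pyRange 0 (L.length : Int) 1).foldl
    (fun s i =>
      let count := s.1 + 1
      if count == 3 then ((0 : Int), s.2 ++ [PySem.List.pyGetD L i ""]) else (count, s.2))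
    ((2 : Int), ([] : List String))).2

-- ===== PORT B =====
-- the loop 'for i in range(0, len(L), 3): acc.append(L[i])'; i is always in range, so pyGetD is exact here
def every_third_alt (L : List String) : List String :=
  (PySem.List.pyRange 0 (L.length : Int) 3).foldl
    (fun acc i => acc ++ [PySem.List.pyGetD L i ""]) []

-- ===== PRECONDITION & SPEC =====
def Spec_every_third (L : List String) (out : List String) : Prop := out = every_third_alt L
instance (L : List String) (out : List String) : Decidable (Spec_every_third L out) := by unfold Spec_every_third; infer_instance

-- ===== CLAIM (what is proved, stated in full; the proofs are below) =====
def Claim_equal_every_third : Prop := ∀ (L : List String), Dom_every_third L → Spec_every_third L (every_third L)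

-- ===== LEMMAS AND PROOFS =====

-- the state-transition of A's loop, seen on the element rather than the index
def stepA (s : Int × List String) (x : String) : Int × List String :=
  let count := s.1 + 1
  if count == 3 then ((0 : Int), s.2 ++ [x]) else (count, s.2)

-- the accumulated output of A's loop as a structural recursion
def gA (c : Int) : List String → List String
  | [] => []
  | a :: t => if c + 1 == 3 then a :: gA 0 t else gA (c + 1) t

theorem foldl_stepA (L : List String) : ∀ (c : Int) (acc : List String),
    (L.foldl stepA (c, acc)).2 = acc ++ gA c L := by
  induction L with
  | nil => intro c acc; simp [gA]
  | cons a t ih =>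
      intro c acc
      by_cases h : c + 1 == 3
      · simp only [List.foldl_cons, stepA, h, if_pos, gA, ih]
        simp
      · simp only [List.foldl_cons, stepA, h, gA, ih]
        simp

-- closed form of the picked-up indices: 0, 3, 6, …
theorem gA_closed_aux : ∀ (n : Nat) (L : List String), L.length = n →
    gA 2 L = (List.range ((L.length + 2) / 3)).map (fun k => L.getD (3 * k) "") := by
  intro n
  induction n using Nat.strong_induction_on with
  | _ n ih =>
    intro L hn
    match L with
    | [] => norm_num [gA]
    | [a] => norm_num [gA, List.range_succ]
    | [a, b] => norm_num [gA, List.range_succ]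
    | a :: b :: c :: t =>
        subst hn
        have hlen : (a :: b :: c :: t).length = t.length + 3 := by simp
        have hm : ((a :: b :: c :: t).length + 2) / 3 = (t.length + 2) / 3 + 1 := by
          rw [hlen]; omega
        have h1 : gA 2 (a :: b :: c :: t) = a :: gA 2 t := by
          simp [gA]
        have ht := ih t.length (by simp; omega) t rfl
        rw [hm, List.range_succ_eq_map, List.map_cons, List.map_map, h1, ht]
        refine List.cons_eq_cons.mpr ⟨by simp, ?_⟩
        apply List.map_congr_left
        intro k _
        show t.getD (3 * k) "" = (a :: b :: c :: t).getD (3 * Nat.succ k) ""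
        rw [show 3 * Nat.succ k = 3 * k + 1 + 1 + 1 by omega]
        simp

theorem pyRange3 (L : List String) :
    PySem.List.pyRange 0 (L.length : Int) 3 =
      (List.range ((L.length + 2) / 3)).map (fun k => ((3 * k : Nat) : Int)) := by
  rw [PySem.List.pyRange_of_pos 0 (L.length : Int) (by norm_num)]
  by_cases h : L.length = 0
  · simp [h]
  · have hlt : (0 : Int) < (L.length : Int) := by
      exact_mod_cast Nat.pos_of_ne_zero h
    rw [if_pos hlt]
    have : (((L.length : Int) - 0 + 3 - 1) / 3).toNat = (L.length + 2) / 3 := by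
      omega
    rw [this]
    apply List.map_congr_left
    intro k _
    push_cast
    ring

-- ===== VERDICT (by name: the statement is the Claim_ definition above) =====
theorem every_third_spec : Claim_equal_every_third := by
  intro L _
  show every_third L = every_third_alt L
  unfold every_third every_third_alt
  have hA : every_third L = (L.foldl stepA ((2 : Int), ([] : List String))).2 :=
    congrArg Prod.snd (PySem.List.foldl_pyRange_zero_pyGetD' L "" stepA ((2 : Int), ([] : List String)))
  rw [show (List.foldl
        (fun s i =>
          let count := s.1 + 1
          if count == 3 then ((0 : Int), s.2 ++ [PySem.List.pyGetD L i ""]) else (count, s.2))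
        ((2 : Int), ([] : List String)) (PySem.List.pyRange 0 (L.length : Int) 1)).2
      = (L.foldl stepA ((2 : Int), ([] : List String))).2 from hA]
  rw [foldl_stepA, gA_closed_aux L.length L rfl, pyRange3,
    PySem.List.foldl_append_singleton_eq_map (fun i => PySem.List.pyGetD L i ""),
    List.map_map]
  apply List.map_congr_left
  intro k _
  show L.getD (3 * k) "" = PySem.List.pyGetD L (((3 * k : Nat) : Int)) ""
  rw [PySem.List.pyGetD_natCast]
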